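-- pv_equiv track=rewrite | github.com/LockeRL/Python | Sem1/lab9/functions.py | str_is_int
-- ===== SOURCE A (Python) =====
-- def str_is_int(massive_item):
--     if massive_item == '0':
--         return 1
--
--     length = len(massive_item)
--
--     if length >= 2 and massive_item[:2] == '-0':
--         return 0
--
--     for i in range(length):
--
--         # Если начинается с 0, то неверный ввод
--         if i == 0 and massive_item[i] == '0':
--             return 0
--
--         # Проверка на знаки, отличные от '-', '.'
--         if not massive_item[i].isdecimal():
--             # Если '-' первый символ, то это просто число
--             if massive_item[i] == '-' and i == 0 and not length == 1:
--                 continue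
--             # Все остальное некорректный ввод
--             else:
--                 return 0
--     return 1
-- ===== SOURCE B (Python) =====
-- # Five-state finite automaton: S=start, Z=seen lone '0', M=seen '-', D=in digits, R=reject sink.
-- def _step(state, ch):
--     if state == 'S':
--         if ch == '0':
--             return 'Z'
--         if ch == '-':
--             return 'M'
--         return 'D' if '1' <= ch <= '9' else 'R'
--     if state == 'M':
--         return 'D' if '1' <= ch <= '9' else 'R'
--     if state == 'D':
--         return 'D' if '0' <= ch <= '9' else 'R'
--     return 'R'
--
-- def str_is_int(massive_item):
--     state = 'S'
--     for ch in massive_item: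
--         state = _step(state, ch)
--     return 1 if state in ('S', 'Z', 'D') else 0
-- ===== Notes on version B (the rewrite author's own statement) =====
-- stated objective: alternative
-- what changed: Replaces A's ad-hoc indexed scan (special-cased '0', a '-0' slice check, i==0 sign/zero logic inside the loop) with a five-state finite automaton: a uniform fold of a transition function over the characters, with acceptance decided by the final state and no base cases, slicing or early returns.
import Mathlib
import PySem

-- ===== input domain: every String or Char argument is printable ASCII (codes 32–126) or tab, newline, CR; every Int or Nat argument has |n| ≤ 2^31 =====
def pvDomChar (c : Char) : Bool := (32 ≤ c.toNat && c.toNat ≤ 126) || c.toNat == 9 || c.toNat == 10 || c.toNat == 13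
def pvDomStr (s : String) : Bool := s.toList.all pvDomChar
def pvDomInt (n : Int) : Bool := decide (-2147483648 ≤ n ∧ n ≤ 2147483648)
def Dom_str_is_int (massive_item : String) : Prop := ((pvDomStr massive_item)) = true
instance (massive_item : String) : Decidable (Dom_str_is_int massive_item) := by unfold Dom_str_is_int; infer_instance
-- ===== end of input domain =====

-- B validates the same integer syntax with a five-state finite automaton folded over the
-- characters instead of A's ad-hoc scan with special cases; same cost, alternative structure.

-- ===== PORT A =====
-- On the ASCII domain Dom_str_is_int, Python's ch.isdecimal() is exactly Char.isDigit ('0'-'9').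
-- A's for-loop with its early returns, transliterated: i is the index, length = len(massive_item).
def strIsIntLoop : List Char → Nat → Nat → Int
  | [], _, _ => 1
  | c :: rest, i, length =>
    if i = 0 ∧ c = '0' then 0
    else if ¬ c.isDigit then
      if c = '-' ∧ i = 0 ∧ ¬ (length = 1) then strIsIntLoop rest (i + 1) length
      else 0
    else strIsIntLoop rest (i + 1) length

def strIsIntCore (cs : List Char) : Int :=
  if cs = ['0'] then 1
  else
    let length := cs.length
    if 2 ≤ length ∧ cs.take 2 = ['-', '0'] then 0
    else strIsIntLoop cs 0 length

def str_is_int (massive_item : String) : Int := strIsIntCore massive_item.toList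

-- ===== PORT B =====
-- Source B's _step: states "S" (start), "Z" (lone '0'), "M" (after '-'), "D" (digits), "R" (reject sink).
def pvStep (state : String) (ch : Char) : String :=
  if state = "S" then
    if ch = '0' then "Z"
    else if ch = '-' then "M"
    else if '1' ≤ ch ∧ ch ≤ '9' then "D" else "R"
  else if state = "M" then
    if '1' ≤ ch ∧ ch ≤ '9' then "D" else "R"
  else if state = "D" then
    if '0' ≤ ch ∧ ch ≤ '9' then "D" else "R"
  else "R"

def str_is_int_alt (massive_item : String) : Int :=
  let fin := massive_item.toList.foldl pvStep "S"
  if fin = "S" ∨ fin = "Z" ∨ fin = "D" then 1 else 0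

-- ===== PRECONDITION & SPEC =====
def Spec_str_is_int (massive_item : String) (out : Int) : Prop := out = str_is_int_alt massive_item
instance (massive_item : String) (out : Int) : Decidable (Spec_str_is_int massive_item out) := by unfold Spec_str_is_int; infer_instance

-- ===== CLAIM (what is proved, stated in full; the proofs are below) =====
def Claim_equal_str_is_int : Prop := ∀ (massive_item : String), Dom_str_is_int massive_item → Spec_str_is_int massive_item (str_is_int massive_item)

-- ===== LEMMAS AND PROOFS =====

lemma digit_iff (c : Char) : ('0' ≤ c ∧ c ≤ '9') ↔ c.isDigit := by
  simp [Char.isDigit, Char.le_def]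

lemma digit19_iff (c : Char) : ('1' ≤ c ∧ c ≤ '9') ↔ (c.isDigit ∧ c ≠ '0') := by
  constructor
  · intro ⟨h1, h2⟩
    refine ⟨(digit_iff c).mp ⟨?_, h2⟩, ?_⟩
    · exact le_trans (by decide) h1
    · intro h; subst h; exact absurd h1 (by decide)
  · intro ⟨hd, h0⟩
    obtain ⟨h1, h2⟩ := (digit_iff c).mpr hd
    refine ⟨?_, h2⟩
    have : '0' ≠ c := fun h => h0 h.symm
    have hlt : '0' < c := lt_of_le_of_ne h1 this
    exact Char.lt_def.mp hlt

lemma foldl_R (l : List Char) : l.foldl pvStep "R" = "R" := by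
  induction l with
  | nil => rfl
  | cons c rest ih => simpa [pvStep] using ih

lemma foldl_D (l : List Char) :
    l.foldl pvStep "D" = if l.all Char.isDigit then "D" else "R" := by
  induction l with
  | nil => rfl
  | cons c rest ih =>
    by_cases hd : c.isDigit
    · have : ('0' ≤ c ∧ c ≤ '9') := (digit_iff c).mpr hd
      simp [List.foldl, pvStep, this, hd, ih]
    · have : ¬ ('0' ≤ c ∧ c ≤ '9') := fun h => hd ((digit_iff c).mp h)
      simp [List.foldl, pvStep, this, hd, foldl_R]

-- Past index 0, A's loop is a plain all-digits scan.
lemma strIsIntLoop_pos (l : List Char) (i length : Nat) :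
    strIsIntLoop l (i + 1) length = if l.all Char.isDigit then 1 else 0 := by
  induction l generalizing i with
  | nil => simp [strIsIntLoop]
  | cons c rest ih =>
    by_cases hd : c.isDigit <;> simp [strIsIntLoop, hd, ih]

lemma core_eq (cs : List Char) :
    strIsIntCore cs = (if cs.foldl pvStep "S" = "S" ∨ cs.foldl pvStep "S" = "Z" ∨ cs.foldl pvStep "S" = "D" then 1 else 0) := by
  cases cs with
  | nil => simp [strIsIntCore, strIsIntLoop]
  | cons c rest =>
    by_cases hc0 : c = '0'
    · subst hc0
      cases rest with
      | nil => simp [strIsIntCore, pvStep]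
      | cons d r =>
        have hZ : pvStep "Z" d = "R" := by simp [pvStep]
        simp [strIsIntCore, strIsIntLoop, List.foldl, pvStep, foldl_R]
    · by_cases hm : c = '-'
      · subst hm
        cases rest with
        | nil =>
          simp [strIsIntCore, strIsIntLoop, List.foldl, pvStep]
        | cons d r =>
          have hS : pvStep "S" '-' = "M" := by simp [pvStep]
          by_cases hd0 : d = '0'
          · subst hd0
            have hM : pvStep "M" '0' = "R" := by simp [pvStep]
            simp [strIsIntCore, List.foldl, hS, hM, foldl_R]
          · by_cases hdd : d.isDigit
            · have h19 : ('1' ≤ d ∧ d ≤ '9') := (digit19_iff d).mpr ⟨hdd, hd0⟩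
              have hM : pvStep "M" d = "D" := by simp [pvStep, h19]
              simp only [strIsIntCore, strIsIntLoop, hd0, hdd, strIsIntLoop_pos,
                List.foldl, hS, hM, foldl_D]
              rcases Decidable.em (∀ x ∈ r, x.isDigit = true) with hall | hall
              · simp [eq_true hall, hd0]
              · simp [hall, hd0]
            · have h19 : ¬ ('1' ≤ d ∧ d ≤ '9') := fun h => hdd ((digit19_iff d).mp h).1
              have hM : pvStep "M" d = "R" := by simp [pvStep, h19]
              simp [strIsIntCore, strIsIntLoop, hd0, hdd,
                List.foldl, hS, hM, foldl_R]
      · by_cases hd : c.isDigit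
        · have h19 : ('1' ≤ c ∧ c ≤ '9') := (digit19_iff c).mpr ⟨hd, hc0⟩
          have hS : pvStep "S" c = "D" := by simp [pvStep, hc0, hm, h19]
          have hne : c :: rest ≠ ['0'] := by simp [hc0]
          simp only [strIsIntCore, strIsIntLoop, hd, strIsIntLoop_pos,
            List.foldl, hS, foldl_D, if_neg hne]
          rcases Decidable.em (∀ x ∈ rest, x.isDigit = true) with hall | hall
          · simp [eq_true hall, hc0, hm]
          · simp [hall, hc0, hm]
        · have h19 : ¬ ('1' ≤ c ∧ c ≤ '9') := fun h => hd ((digit19_iff c).mp h).1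
          have hS : pvStep "S" c = "R" := by simp [pvStep, hc0, hm, h19]
          have hne : c :: rest ≠ ['0'] := by simp [hc0]
          simp [strIsIntCore, hne, strIsIntLoop, hc0, hm, hd,
            List.foldl, hS, foldl_R]

-- ===== VERDICT (by name: the statement is the Claim_ definition above) =====
theorem str_is_int_spec : Claim_equal_str_is_int := by
  intro s _
  unfold Spec_str_is_int str_is_int str_is_int_alt
  exact core_eq s.toList
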